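-- pv_equiv track=rewrite | github.com/michael-j-potts/Portfolio | HeartDiseaseClassifier/Dataset/dataset_prep.py | data_organizer
-- ===== SOURCE A (Python) =====
-- def data_organizer(input_file):
--     file = []
--     for line in input_file:
--         line = line.replace('\n', "")
--         split = line.split(" ")
--         file.append(split)
--     data = []
--     patient = []
--     for i in file:
--         for j in i:
--             if j != 'name':
--                 patient.append(j)
--             else:
--                 data.append(patient)
--                 patient = []
--     return data
-- ===== SOURCE B (Python) =====
-- def data_organizer(input_file):
--     tokens = [t for line in input_file for t in line.replace('\n', '').split(' ')]
--     data = []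
--     start = 0
--     for idx, t in enumerate(tokens):
--         if t == 'name':
--             data.append(tokens[start:idx])
--             start = idx + 1
--     return data
-- ===== Notes on version B (the rewrite author's own statement) =====
-- stated objective: alternative
-- what changed: Replaces A's nested line/token loops with a reset accumulator list by one flattened token list scanned once with a running start index, emitting each record as a slice tokens[start:idx] at every 'name' boundary.
import Mathlib
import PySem

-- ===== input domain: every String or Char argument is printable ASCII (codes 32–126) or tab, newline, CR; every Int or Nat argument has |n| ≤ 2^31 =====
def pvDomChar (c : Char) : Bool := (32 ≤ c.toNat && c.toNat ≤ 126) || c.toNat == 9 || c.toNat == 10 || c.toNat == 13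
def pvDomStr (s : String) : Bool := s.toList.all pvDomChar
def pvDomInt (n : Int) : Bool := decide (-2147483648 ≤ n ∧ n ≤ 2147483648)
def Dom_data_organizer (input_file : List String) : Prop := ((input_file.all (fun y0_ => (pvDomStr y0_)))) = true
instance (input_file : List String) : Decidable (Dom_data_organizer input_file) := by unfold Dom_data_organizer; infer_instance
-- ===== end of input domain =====

-- B flattens all tokens once and emits records as index-based slices at each 'name' boundary
-- instead of A's nested loops with a reset accumulator list (objective: alternative decomposition).


-- tokenization shared by both Pythons: line.replace('\n','').split(' ')
-- (sep " " is nonempty, so Python's split never raises; split? is always `some` here)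
def pvTok (line : String) : List String :=
  (PySem.Str.split? (PySem.Str.replace line "\n" "") " ").getD []

-- ===== PORT A =====
def data_organizer (input_file : List String) : List (List String) :=
  let file := input_file.foldl (fun file line => file ++ [pvTok line]) []
  let res := file.foldl
    (fun (st : List (List String) × List String) i =>
      i.foldl
        (fun (st : List (List String) × List String) j =>
          if j ≠ "name" then (st.1, st.2 ++ [j]) else (st.1 ++ [st.2], []))
        st)
    ([], [])
  res.1

-- ===== PORT B =====
def data_organizer_alt (input_file : List String) : List (List String) :=
  let tokens := input_file.flatMap pvTok
  let res := (PySem.List.enumerate tokens).foldl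
    (fun (st : List (List String) × Int) p =>
      if p.2 = "name" then (st.1 ++ [PySem.List.slice tokens (some st.2) (some p.1)], p.1 + 1)
      else st)
    ([], 0)
  res.1

-- ===== PRECONDITION & SPEC =====
def Spec_data_organizer (input_file : List String) (out : List (List String)) : Prop := out = data_organizer_alt input_file
instance (input_file : List String) (out : List (List String)) : Decidable (Spec_data_organizer input_file out) := by unfold Spec_data_organizer; infer_instance

-- ===== CLAIM (what is proved, stated in full; the proofs are below) =====
def Claim_equal_data_organizer : Prop := ∀ (input_file : List String), Dom_data_organizer input_file → Spec_data_organizer input_file (data_organizer input_file)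

-- ===== LEMMAS AND PROOFS =====

-- the common semantics: split the token stream at each 'name', dropping the trailing segment
def pvSegs (cur : List String) : List String → List (List String)
  | [] => []
  | t :: ts => if t = "name" then cur :: pvSegs [] ts else pvSegs (cur ++ [t]) ts

def pvFA (st : List (List String) × List String) (j : String) : List (List String) × List String :=
  if j ≠ "name" then (st.1, st.2 ++ [j]) else (st.1 ++ [st.2], [])

theorem pvFA_segs : ∀ (ts : List String) (data : List (List String)) (patient : List String),
    (ts.foldl pvFA (data, patient)).1 = data ++ pvSegs patient ts := by
  intro ts
  induction ts with
  | nil => intro data patient; simp [pvSegs]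
  | cons t ts ih =>
    intro data patient
    by_cases h : t = "name"
    · simp [pvFA, pvSegs, h, ih]
    · simp [pvFA, pvSegs, h, ih]

theorem pv_foldl_flatten {α β : Type} (f : β → α → β) :
    ∀ (l : List (List α)) (b : β), l.foldl (fun st i => i.foldl f st) b = l.flatten.foldl f b := by
  intro l
  induction l with
  | nil => intro b; simp
  | cons x l ih => intro b; simp [List.foldl_append, ih]

theorem pv_foldl_append_map {α β : Type} (f : α → β) :
    ∀ (l : List α) (acc : List β), l.foldl (fun acc line => acc ++ [f line]) acc = acc ++ l.map f := by
  intro l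
  induction l with
  | nil => intro acc; simp
  | cons x l ih => intro acc; simp [ih]

def pvFB (T : List String) (st : List (List String) × Int) (p : Int × String) :
    List (List String) × Int :=
  if p.2 = "name" then (st.1 ++ [PySem.List.slice T (some st.2) (some p.1)], p.1 + 1) else st

theorem pvFB_segs (T : List String) :
    ∀ (ts : List String) (i s : Nat) (data : List (List String)),
    s ≤ i → T.drop i = ts →
    ((PySem.List.enumerate ts (i : Int)).foldl (pvFB T) (data, (s : Int))).1
      = data ++ pvSegs ((T.drop s).take (i - s)) ts := by
  intro ts
  induction ts with
  | nil => intro i s data _ _; simp [PySem.List.enumerate, pvSegs]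
  | cons t ts ih =>
    intro i s data hsi hdrop
    have hTi : T[i]? = some t := by
      have : (T.drop i)[0]? = some t := by rw [hdrop]; rfl
      simpa using this
    have hdrop' : T.drop (i + 1) = ts := by
      have := congrArg List.tail hdrop
      simpa [List.tail_drop] using this
    rw [PySem.List.enumerate_cons]
    by_cases h : t = "name"
    · have step : pvFB T (data, (s : Int)) ((i : Int), t)
          = (data ++ [(T.drop s).take (i - s)], ((i + 1 : Nat) : Int)) := by
        simp [pvFB, h, PySem.List.slice_natCast]
      have hcast : ((i : Int) + 1) = ((i + 1 : Nat) : Int) := by omega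
      rw [List.foldl_cons, step, hcast, ih (i + 1) (i + 1) _ (le_refl _) hdrop']
      simp [pvSegs, h]
    · have step : pvFB T (data, (s : Int)) ((i : Int), t) = (data, (s : Int)) := by
        simp [pvFB, h]
      have hcast : ((i : Int) + 1) = ((i + 1 : Nat) : Int) := by omega
      rw [List.foldl_cons, step, hcast, ih (i + 1) s _ (by omega) hdrop']
      have htake : (T.drop s).take (i + 1 - s) = (T.drop s).take (i - s) ++ [t] := by
        have hn : i + 1 - s = (i - s) + 1 := by omega
        have hget : (T.drop s)[i - s]? = some t := by
          rw [List.getElem?_drop]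
          have : s + (i - s) = i := by omega
          rw [this, hTi]
        rw [hn, List.take_add_one, hget]
        rfl
      rw [htake]
      simp [pvSegs, h]

-- ===== VERDICT (by name: the statement is the Claim_ definition above) =====
theorem data_organizer_spec : Claim_equal_data_organizer := by
  intro input_file _
  unfold Spec_data_organizer data_organizer data_organizer_alt
  have hA :
      (input_file.foldl (fun file line => file ++ [pvTok line]) []).foldl
        (fun (st : List (List String) × List String) i => i.foldl pvFA st) ([], [])
       = ((input_file.flatMap pvTok).foldl pvFA ([], [])) := by
    rw [pv_foldl_append_map, pv_foldl_flatten, List.nil_append, List.flatMap_def]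
  show (_ : List (List String) × List String).1 = _
  calc
    ((input_file.foldl (fun file line => file ++ [pvTok line]) []).foldl
        (fun (st : List (List String) × List String) i => i.foldl pvFA st) ([], [])).1
        = ((input_file.flatMap pvTok).foldl pvFA ([], [])).1 := by rw [hA]
    _ = pvSegs [] (input_file.flatMap pvTok) := by
        rw [pvFA_segs]; simp
    _ = ((PySem.List.enumerate (input_file.flatMap pvTok) ((0 : Nat) : Int)).foldl
          (pvFB (input_file.flatMap pvTok)) ([], ((0 : Nat) : Int))).1 := by
        rw [pvFB_segs (input_file.flatMap pvTok) (input_file.flatMap pvTok) 0 0 [] (le_refl _) (by simp)]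
        simp
    _ = _ := by rfl
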